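-- pv_equiv track=rewrite | github.com/bretbouchard/blender_gsd | lib/development/shot_rules.py | suggest_shot_size
-- ===== SOURCE A (Python) =====
-- SHOT_SIZE_RULES = {
--     "facial_emotion": "cu",
--     "dialogue_speaking": "mcu",
--     "dialogue_listening": "cu",
--     "action_full": "w",
--     "action_detail": "ecu",
--     "two_characters": "m",
--     "group_small": "mf",
--     "group_large": "w",
--     "location_context": "ew",
--     "hand_action": "cu",
--     "object_detail": "ecu",
--     "movement_full": "f",
--     "reaction": "cu",
--     "walking": "mf",
--     "running": "w",
--     "intimate": "cu",
--     "confrontation": "m"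
-- }
--
-- def suggest_shot_size(subject: str, action: str, context: str) -> str:
--     """Suggest appropriate shot size based on content.
--
--     Args:
--         subject: What/who is being shot
--         action: What action is occurring
--         context: Scene context (dialogue, action, etc.)
--
--     Returns:
--         Suggested shot size code
--     """
--     subject_lower = subject.lower()
--     action_lower = action.lower()
--     context_lower = context.lower()
--
--     # Check for specific subject indicators
--     if any(k in subject_lower for k in ["face", "eyes", "expression"]):
--         return SHOT_SIZE_RULES["facial_emotion"]
--
--     if any(k in subject_lower for k in ["hand", "finger", "detail", "object"]):
--         return SHOT_SIZE_RULES["object_detail"]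
--
--     if any(k in subject_lower for k in ["group", "crowd", "audience"]):
--         return SHOT_SIZE_RULES["group_large"]
--
--     # Check action indicators
--     if any(k in action_lower for k in ["run", "chase", "fight", "chase"]):
--         return SHOT_SIZE_RULES["running"]
--
--     if any(k in action_lower for k in ["walk", "approach", "enter"]):
--         return SHOT_SIZE_RULES["walking"]
--
--     if any(k in action_lower for k in ["speak", "talk", "say", "whisper"]):
--         return SHOT_SIZE_RULES["dialogue_speaking"]
--
--     if any(k in action_lower for k in ["listen", "react", "watch"]):
--         return SHOT_SIZE_RULES["dialogue_listening"]
--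
--     # Check context
--     if context_lower == "action":
--         return SHOT_SIZE_RULES["action_full"]
--
--     if context_lower == "dialogue":
--         return SHOT_SIZE_RULES["dialogue_speaking"]
--
--     if context_lower == "transition":
--         return SHOT_SIZE_RULES["location_context"]
--
--     # Default to medium shot
--     return "m"
-- ===== SOURCE B (Python) =====
-- # Different strategy: evaluate ALL rules (no early exit), collect every matching
-- # rule's priority, then select the best-priority match with min().
-- _RULES = [
--     ("sub", ("face", "eyes", "expression"), "cu"),
--     ("sub", ("hand", "finger", "detail", "object"), "ecu"),
--     ("sub", ("group", "crowd", "audience"), "w"),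
--     ("act", ("run", "chase", "fight", "chase"), "w"),
--     ("act", ("walk", "approach", "enter"), "mf"),
--     ("act", ("speak", "talk", "say", "whisper"), "mcu"),
--     ("act", ("listen", "react", "watch"), "cu"),
--     ("ctx", ("action",), "w"),
--     ("ctx", ("dialogue",), "mcu"),
--     ("ctx", ("transition",), "ew"),
-- ]
--
-- def suggest_shot_size(subject: str, action: str, context: str) -> str:
--     fields = {"sub": subject.lower(), "act": action.lower(), "ctx": context.lower()}
--     matched = [
--         (prio, code)
--         for prio, (field, keys, code) in enumerate(_RULES)
--         if (fields[field] == keys[0] if field == "ctx"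
--             else any(k in fields[field] for k in keys))
--     ]
--     return min(matched, key=lambda m: m[0])[1] if matched else "m"
-- ===== Notes on version B (the rewrite author's own statement) =====
-- stated objective: alternative
-- what changed: A is a first-match early-return if-chain; B evaluates every rule unconditionally, collects all matching (priority, code) pairs, and then selects the answer by a min-by-priority aggregation over the match set, defaulting to 'm' when empty.
import Mathlib
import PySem

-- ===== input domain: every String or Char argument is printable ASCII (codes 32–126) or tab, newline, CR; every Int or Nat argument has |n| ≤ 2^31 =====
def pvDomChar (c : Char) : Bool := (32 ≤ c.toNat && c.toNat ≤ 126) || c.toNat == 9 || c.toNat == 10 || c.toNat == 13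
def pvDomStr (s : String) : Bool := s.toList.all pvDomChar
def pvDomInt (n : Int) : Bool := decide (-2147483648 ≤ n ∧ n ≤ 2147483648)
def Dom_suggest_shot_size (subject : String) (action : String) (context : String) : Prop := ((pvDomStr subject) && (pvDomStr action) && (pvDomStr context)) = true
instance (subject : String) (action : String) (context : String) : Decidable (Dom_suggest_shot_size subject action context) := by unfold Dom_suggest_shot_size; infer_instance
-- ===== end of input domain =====

-- B evaluates every rule, collects all matches and selects by min priority, instead of A's early-return if-chain; return values agree everywhere.

-- ===== PORT A =====
-- literal transliteration of A; SHOT_SIZE_RULES["<key>"] lookups are constant-dict/constant-key and inlined to their values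
def suggest_shot_size (subject : String) (action : String) (context : String) : String :=
  let subject_lower := PySem.Str.lower subject
  let action_lower := PySem.Str.lower action
  let context_lower := PySem.Str.lower context
  if ["face", "eyes", "expression"].any (fun k => PySem.Str.isIn k subject_lower) then "cu"
  else if ["hand", "finger", "detail", "object"].any (fun k => PySem.Str.isIn k subject_lower) then "ecu"
  else if ["group", "crowd", "audience"].any (fun k => PySem.Str.isIn k subject_lower) then "w"
  else if ["run", "chase", "fight", "chase"].any (fun k => PySem.Str.isIn k action_lower) then "w"
  else if ["walk", "approach", "enter"].any (fun k => PySem.Str.isIn k action_lower) then "mf"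
  else if ["speak", "talk", "say", "whisper"].any (fun k => PySem.Str.isIn k action_lower) then "mcu"
  else if ["listen", "react", "watch"].any (fun k => PySem.Str.isIn k action_lower) then "cu"
  else if context_lower == "action" then "w"
  else if context_lower == "dialogue" then "mcu"
  else if context_lower == "transition" then "ew"
  else "m"

-- ===== PORT B =====
-- the rule table of Source B: (field name, keywords, code)
def pvRulesB : List (String × List String × String) :=
  [ ("sub", ["face", "eyes", "expression"], "cu"),
    ("sub", ["hand", "finger", "detail", "object"], "ecu"),
    ("sub", ["group", "crowd", "audience"], "w"),
    ("act", ["run", "chase", "fight", "chase"], "w"),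
    ("act", ["walk", "approach", "enter"], "mf"),
    ("act", ["speak", "talk", "say", "whisper"], "mcu"),
    ("act", ["listen", "react", "watch"], "cu"),
    ("ctx", ["action"], "w"),
    ("ctx", ["dialogue"], "mcu"),
    ("ctx", ["transition"], "ew") ]

-- Source B's  `min(matched, key=lambda m: m[0])[1] if matched else "m"`  (min keeps the first minimum)
def pvMinByPrio (matched : List (Int × String)) : String :=
  match matched with
  | [] => "m"
  | x :: xs => (xs.foldl (fun b y => if y.1 < b.1 then y else b) x).2

-- Source B: build the full list of matching (priority, code) pairs over all rules, then min by priority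
def suggest_shot_size_alt (subject : String) (action : String) (context : String) : String :=
  let fields : PySem.Dict String String :=
    PySem.Dict.ofList [("sub", PySem.Str.lower subject), ("act", PySem.Str.lower action), ("ctx", PySem.Str.lower context)]
  let matched : List (Int × String) :=
    (PySem.List.enumerate pvRulesB).filterMap (fun pr =>
      if (if pr.2.1 == "ctx" then fields.getD pr.2.1 "" == pr.2.2.1.headD ""
          else pr.2.2.1.any (fun k => PySem.Str.isIn k (fields.getD pr.2.1 "")))
      then some (pr.1, pr.2.2.2) else none)
  pvMinByPrio matched

-- ===== PRECONDITION & SPEC =====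
def Spec_suggest_shot_size (subject : String) (action : String) (context : String) (out : String) : Prop := out = suggest_shot_size_alt subject action context
instance (subject : String) (action : String) (context : String) (out : String) : Decidable (Spec_suggest_shot_size subject action context out) := by unfold Spec_suggest_shot_size; infer_instance

-- ===== CLAIM (what is proved, stated in full; the proofs are below) =====
def Claim_equal_suggest_shot_size : Prop := ∀ (subject : String) (action : String) (context : String), Dom_suggest_shot_size subject action context → Spec_suggest_shot_size subject action context (suggest_shot_size subject action context)

-- ===== LEMMAS AND PROOFS =====

-- the rule condition of B, as a function of the fields dict and one rule
def pvCond (fields : PySem.Dict String String) (r : String × List String × String) : Bool :=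
  if r.1 == "ctx" then fields.getD r.1 "" == r.2.1.headD ""
  else r.2.1.any (fun k => PySem.Str.isIn k (fields.getD r.1 ""))

-- abstract shapes: the matched list laid out rule by rule, and A's first-match chain
def pvLayout : List (Bool × String) → Int → List (Int × String)
  | [], _ => []
  | (b, c) :: rs, i => (if b then [(i, c)] else []) ++ pvLayout rs (i + 1)

def pvChain : List (Bool × String) → String
  | [] => "m"
  | (b, c) :: rs => if b then c else pvChain rs

theorem pvMem_layout_le (rs : List (Bool × String)) : ∀ (i : Int) (y : Int × String), y ∈ pvLayout rs i → i ≤ y.1 := by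
  induction rs with
  | nil => intro i y h; simp [pvLayout] at h
  | cons r rs ih =>
    intro i y h
    obtain ⟨b, c⟩ := r
    simp only [pvLayout, List.mem_append] at h
    rcases h with h | h
    · cases b <;> simp_all
    · have := ih (i + 1) y h; omega

theorem pvFoldl_min_keep (xs : List (Int × String)) : ∀ (x : Int × String), (∀ y ∈ xs, ¬ y.1 < x.1) → xs.foldl (fun b y => if y.1 < b.1 then y else b) x = x := by
  induction xs with
  | nil => intro x _; rfl
  | cons z zs ih =>
    intro x h
    simp only [List.foldl_cons, if_neg (h z (by simp))]
    exact ih x (fun y hy => h y (by simp [hy]))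

theorem pvMinByPrio_layout (rs : List (Bool × String)) : ∀ (i : Int), pvMinByPrio (pvLayout rs i) = pvChain rs := by
  induction rs with
  | nil => intro i; rfl
  | cons r rs ih =>
    intro i
    obtain ⟨b, c⟩ := r
    cases b with
    | false => simpa [pvLayout, pvChain] using ih (i + 1)
    | true =>
      have hk : ∀ y ∈ pvLayout rs (i + 1), ¬ y.1 < (Prod.mk i c).1 := by
        intro y hy
        have := pvMem_layout_le rs (i + 1) y hy
        simp only []
        omega
      simp [pvLayout, pvChain, pvMinByPrio, pvFoldl_min_keep _ _ hk]

theorem pvFilterMap_layout (fields : PySem.Dict String String) (rs : List (String × List String × String)) : ∀ (i : Int),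
    (PySem.List.enumerate rs i).filterMap (fun pr =>
      if (if pr.2.1 == "ctx" then fields.getD pr.2.1 "" == pr.2.2.1.headD ""
          else pr.2.2.1.any (fun k => PySem.Str.isIn k (fields.getD pr.2.1 "")))
      then some (pr.1, pr.2.2.2) else none)
    = pvLayout (rs.map (fun r => (pvCond fields r, r.2.2))) i := by
  induction rs with
  | nil => intro i; rfl
  | cons r rs ih =>
    intro i
    rw [PySem.List.enumerate_cons, List.filterMap_cons, ih (i + 1)]
    simp only [List.map_cons, pvLayout, pvCond]
    cases (if r.1 == "ctx" then fields.getD r.1 "" == r.2.1.headD ""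
               else r.2.1.any (fun k => PySem.Str.isIn k (fields.getD r.1 ""))) with
    | false => simp only [Bool.false_eq_true, if_false, List.nil_append]
    | true => simp only [if_true, List.singleton_append]

-- facts about B's literal fields dict and literal key comparisons (specific to B's table)
theorem pvFieldSub (x y z : String) : (PySem.Dict.ofList [("sub", x), ("act", y), ("ctx", z)]).getD "sub" "" = x := rfl
theorem pvFieldAct (x y z : String) : (PySem.Dict.ofList [("sub", x), ("act", y), ("ctx", z)]).getD "act" "" = y := rfl
theorem pvFieldCtx (x y z : String) : (PySem.Dict.ofList [("sub", x), ("act", y), ("ctx", z)]).getD "ctx" "" = z := rfl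

theorem pvAltEq (subject action context : String) :
    suggest_shot_size_alt subject action context =
      pvChain (pvRulesB.map (fun r => (pvCond (PySem.Dict.ofList
        [("sub", PySem.Str.lower subject), ("act", PySem.Str.lower action), ("ctx", PySem.Str.lower context)]) r, r.2.2))) := by
  unfold suggest_shot_size_alt
  simp only []
  rw [pvFilterMap_layout, pvMinByPrio_layout]

-- ===== VERDICT (by name: the statement is the Claim_ definition above) =====
theorem suggest_shot_size_spec : Claim_equal_suggest_shot_size := by
  intro subject action context _
  unfold Spec_suggest_shot_size
  rw [pvAltEq]
  simp only [pvRulesB, List.map_cons, List.map_nil, pvCond, pvFieldSub, pvFieldAct, pvFieldCtx]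
  rfl
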